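-- pv_equiv track=rewrite | github.com/Bani57/rumourEval2019 | classification_utils.py | get_indexes_of_samples_with_label
-- ===== SOURCE A (Python) =====
-- def get_indexes_of_samples_with_label(labels):
--     num_rows = len(labels)
--     indexes = {}
--     for i in range(num_rows):
--         class_of_sample = labels[i]
--         indexes.setdefault(class_of_sample, [])
--         indexes[class_of_sample].append(i)
--     return indexes
-- ===== SOURCE B (Python) =====
-- def get_indexes_of_samples_with_label(labels):
--     return {lab: [i for i, l in enumerate(labels) if l == lab]
--             for lab in dict.fromkeys(labels)}
-- ===== Notes on version B (the rewrite author's own statement) =====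
-- stated objective: idiomatic
-- what changed: Replaces the single mutating grouping pass with a dict comprehension over the distinct labels (first-occurrence order) whose inner enumerate-and-filter scan collects each label's indexes.
import Mathlib
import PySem

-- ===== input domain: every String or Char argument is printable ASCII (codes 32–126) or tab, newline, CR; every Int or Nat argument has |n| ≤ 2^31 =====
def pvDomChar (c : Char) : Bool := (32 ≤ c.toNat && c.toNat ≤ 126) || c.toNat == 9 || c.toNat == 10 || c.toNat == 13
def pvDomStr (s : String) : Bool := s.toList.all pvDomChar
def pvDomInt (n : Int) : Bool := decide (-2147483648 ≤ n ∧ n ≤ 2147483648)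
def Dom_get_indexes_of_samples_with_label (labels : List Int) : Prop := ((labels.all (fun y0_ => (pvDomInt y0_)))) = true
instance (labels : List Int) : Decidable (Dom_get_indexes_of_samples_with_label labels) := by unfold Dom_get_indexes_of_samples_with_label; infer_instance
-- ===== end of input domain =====

-- B replaces A's single mutating grouping pass by a dict comprehension over the distinct labels
-- (first-occurrence order) with an inner enumerate-and-filter scan per label (objective: idiomatic).


-- ===== PORT A =====
-- for i in range(num_rows): indexes.setdefault(labels[i], []); indexes[labels[i]].append(i)
-- 'setdefault(c, []) then d[c].append(i)' is exactly d[c] = d.get(c, []) + [i], i.e. Dict.modify c [] (· ++ [i]);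
-- labels[i] with 0 ≤ i < len(labels) never raises, so pyGetD is exact here.
def get_indexes_of_samples_with_label (labels : List Int) : List (Int × List Int) :=
  let num_rows : Int := PySem.List.len labels
  ((PySem.List.pyRange 0 num_rows 1).foldl
    (fun (d : PySem.Dict Int (List Int)) i =>
      d.modify (PySem.List.pyGetD labels i 0) [] (fun l => l ++ [i]))
    PySem.Dict.empty).items

-- ===== PORT B =====
-- {lab: [i for i, l in enumerate(labels) if l == lab] for lab in dict.fromkeys(labels)}
def get_indexes_of_samples_with_label_alt (labels : List Int) : List (Int × List Int) :=
  (PySem.List.dedup labels).map (fun lab =>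
    (lab, (PySem.List.enumerate labels).filterMap (fun p => if p.2 = lab then some p.1 else none)))

-- ===== PRECONDITION & SPEC =====
def Spec_get_indexes_of_samples_with_label (labels : List Int) (out : List (Int × List Int)) : Prop := out = get_indexes_of_samples_with_label_alt labels
instance (labels : List Int) (out : List (Int × List Int)) : Decidable (Spec_get_indexes_of_samples_with_label labels out) := by unfold Spec_get_indexes_of_samples_with_label; infer_instance

-- ===== CLAIM (what is proved, stated in full; the proofs are below) =====
def Claim_equal_get_indexes_of_samples_with_label : Prop := ∀ (labels : List Int), Dom_get_indexes_of_samples_with_label labels → Spec_get_indexes_of_samples_with_label labels (get_indexes_of_samples_with_label labels)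

-- ===== LEMMAS AND PROOFS =====

-- A dict with distinct keys is its key list paired with the stored values.
theorem items_eq_keys_map_getD {κ ν : Type} [BEq κ] [LawfulBEq κ]
    (d : PySem.Dict κ ν) (d0 : ν) (h : d.keys.Nodup) :
    d.items = d.keys.map (fun k => (k, d.getD k d0)) := by
  have hk : d.keys = d.items.map (fun p => p.1) := rfl
  symm
  rw [hk, List.map_map]
  refine (List.map_congr_left ?_).trans (List.map_id d.items)
  intro p hp
  have := PySem.Dict.getD_of_mem_items d (k := p.1) (v := p.2) (by simpa using hp) h d0
  simp [Function.comp, this]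

-- the inner comprehension of B, as filter-then-map over the swapped pairs
theorem filterMap_eq_filter_swap {α β : Type} [DecidableEq β] (l : List (α × β)) (c : β) :
    l.filterMap (fun p => if p.2 = c then some p.1 else none)
      = (List.filter (fun p => p.1 == c) (l.map Prod.swap)).map (fun x => x.2) := by
  induction l with
  | nil => rfl
  | cons p t ih =>
    by_cases hp : p.2 = c <;> simp [Prod.swap, hp, ih]

theorem get_indexes_eq (labels : List Int) :
    get_indexes_of_samples_with_label labels = get_indexes_of_samples_with_label_alt labels := by
  -- rewrite A's index loop as a fold over the swapped (label, index) pairs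
  have hswap : (PySem.List.enumerate labels).map Prod.swap
      = (PySem.List.pyRange 0 (PySem.List.len labels) 1).map
          (fun j => (PySem.List.pyGetD labels j 0, j)) := by
    rw [PySem.List.enumerate_eq_map_pyRange labels 0, List.map_map]; rfl
  have hfold : (PySem.List.pyRange 0 (PySem.List.len labels) 1).foldl
      (fun (d : PySem.Dict Int (List Int)) i =>
        d.modify (PySem.List.pyGetD labels i 0) [] (fun l => l ++ [i]))
      PySem.Dict.empty
      = ((PySem.List.enumerate labels).map Prod.swap).foldl
          (fun d p => d.modify p.1 [] (fun l => l ++ [p.2])) PySem.Dict.empty := by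
    rw [hswap, List.foldl_map]
  have hnodup : (((PySem.List.enumerate labels).map Prod.swap).foldl
      (fun d p => d.modify p.1 [] (fun l => l ++ [p.2])) PySem.Dict.empty).keys.Nodup :=
    PySem.Dict.nodup_keys_foldl_modify_key _ (fun (p : Int × Int) => p.1) [] (fun _ p => (· ++ [p.2]))
      PySem.Dict.empty (by simp [PySem.Dict.keys_empty])
  have hkeys : (((PySem.List.enumerate labels).map Prod.swap).foldl
      (fun d p => d.modify p.1 [] (fun l => l ++ [p.2])) PySem.Dict.empty).keys
      = PySem.List.dedup labels := by
    rw [PySem.Dict.keys_foldl_modify_key _ (fun (p : Int × Int) => p.1) [] (fun _ p => (· ++ [p.2]))]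
    have h1 : ((PySem.List.enumerate labels).map Prod.swap).map (fun p => p.1) = labels := by
      rw [List.map_map]
      exact PySem.List.map_snd_enumerate labels 0
    simp [PySem.Dict.keys_empty, h1, PySem.Set.update_nil_left, PySem.List.dedup_eq_ofList]
  show (((PySem.List.pyRange 0 (PySem.List.len labels) 1).foldl
      (fun (d : PySem.Dict Int (List Int)) i =>
        d.modify (PySem.List.pyGetD labels i 0) [] (fun l => l ++ [i]))
      PySem.Dict.empty)).items = _
  rw [hfold, items_eq_keys_map_getD _ [] hnodup, hkeys]
  unfold get_indexes_of_samples_with_label_alt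
  refine List.map_congr_left ?_
  intro lab _
  have hgetD := PySem.Dict.getD_foldl_modify_append
    ((PySem.List.enumerate labels).map Prod.swap) PySem.Dict.empty lab
  simp only [PySem.Dict.getD_empty, List.nil_append] at hgetD
  rw [hgetD, filterMap_eq_filter_swap]

-- ===== VERDICT (by name: the statement is the Claim_ definition above) =====
theorem get_indexes_of_samples_with_label_spec : Claim_equal_get_indexes_of_samples_with_label := by
  intro labels _
  exact get_indexes_eq labels
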